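-- pv_equiv track=rewrite | github.com/Mar-Atn/THUCYDIDES | app/engine/config/map_config.py | hex_range
-- ===== SOURCE A (Python) =====
-- def hex_neighbors(row: int, col: int) -> list[tuple[int, int]]:
--     """Return the 6 adjacent hex coordinates for a given (row, col).
--
--     Uses odd-r offset convention (pointy-top). Coordinates are 1-indexed.
--     In 1-indexed coords, EVEN rows are visually shifted right (they map to
--     0-indexed odd rows in the renderer which applies the half-hex offset).
--     Does NOT check bounds — caller must filter.
--     """
--     if row % 2 == 0:  # even row (1-indexed) = shifted right in renderer
--         deltas = [(-1, 0), (-1, 1), (0, -1), (0, 1), (1, 0), (1, 1)]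
--     else:  # odd row (1-indexed) = NOT shifted
--         deltas = [(-1, -1), (-1, 0), (0, -1), (0, 1), (1, -1), (1, 0)]
--     return [(row + dr, col + dc) for dr, dc in deltas]
--
-- def hex_neighbors_bounded(row: int, col: int, max_rows: int = 10, max_cols: int = 20) -> list[tuple[int, int]]:
--     """Return adjacent hex coordinates, filtered to grid bounds (1-indexed)."""
--     return [
--         (r, c) for r, c in hex_neighbors(row, col)
--         if 1 <= r <= max_rows and 1 <= c <= max_cols
--     ]
--
-- GLOBAL_ROWS: int = 10
--
-- GLOBAL_COLS: int = 20
--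
-- def hex_range(
--     row: int, col: int, distance: int,
--     max_rows: int = GLOBAL_ROWS, max_cols: int = GLOBAL_COLS,
-- ) -> list[tuple[int, int]]:
--     """Return all hexes within ``distance`` steps of (row, col), excluding origin.
--
--     BFS expansion using hex adjacency.  1-indexed coordinates.
--     """
--     if distance <= 0:
--         return []
--     visited: set[tuple[int, int]] = {(row, col)}
--     frontier: set[tuple[int, int]] = {(row, col)}
--     for _ in range(distance):
--         next_ring: set[tuple[int, int]] = set()
--         for r, c in frontier:
--             for nr, nc in hex_neighbors_bounded(r, c, max_rows, max_cols):
--                 if (nr, nc) not in visited: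
--                     next_ring.add((nr, nc))
--                     visited.add((nr, nc))
--         frontier = next_ring
--     visited.discard((row, col))  # exclude origin
--     return sorted(visited)
-- ===== SOURCE B (Python) =====
-- def hex_neighbors(row: int, col: int) -> list[tuple[int, int]]:
--     if row % 2 == 0:
--         deltas = [(-1, 0), (-1, 1), (0, -1), (0, 1), (1, 0), (1, 1)]
--     else:
--         deltas = [(-1, -1), (-1, 0), (0, -1), (0, 1), (1, -1), (1, 0)]
--     return [(row + dr, col + dc) for dr, dc in deltas]
--
--
-- def hex_neighbors_bounded(row: int, col: int, max_rows: int = 10, max_cols: int = 20) -> list[tuple[int, int]]: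
--     return [
--         (r, c) for r, c in hex_neighbors(row, col)
--         if 1 <= r <= max_rows and 1 <= c <= max_cols
--     ]
--
--
-- def hex_range(
--     row: int, col: int, distance: int,
--     max_rows: int = 10, max_cols: int = 20,
-- ) -> list[tuple[int, int]]:
--     """Queue-based BFS with per-node distance labels; expansion stops
--     when the queue empties."""
--     visited = {(row, col)}
--     queue = [(row, col, 0)]
--     i = 0
--     while i < len(queue):
--         r, c, d = queue[i]
--         i += 1
--         if d < distance:
--             for nr, nc in hex_neighbors_bounded(r, c, max_rows, max_cols):
--                 if (nr, nc) not in visited: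
--                     visited.add((nr, nc))
--                     queue.append((nr, nc, d + 1))
--     visited.discard((row, col))
--     return sorted(visited)
-- ===== Notes on version B (the rewrite author's own statement) =====
-- stated objective: alternative
-- what changed: Replaced A's synchronous ring expansion (outer range(distance) loop over frontier/next_ring sets) by a single queue-based BFS with per-node distance labels and enqueue-time visited marking, which stops as soon as the queue empties.
import Mathlib
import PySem

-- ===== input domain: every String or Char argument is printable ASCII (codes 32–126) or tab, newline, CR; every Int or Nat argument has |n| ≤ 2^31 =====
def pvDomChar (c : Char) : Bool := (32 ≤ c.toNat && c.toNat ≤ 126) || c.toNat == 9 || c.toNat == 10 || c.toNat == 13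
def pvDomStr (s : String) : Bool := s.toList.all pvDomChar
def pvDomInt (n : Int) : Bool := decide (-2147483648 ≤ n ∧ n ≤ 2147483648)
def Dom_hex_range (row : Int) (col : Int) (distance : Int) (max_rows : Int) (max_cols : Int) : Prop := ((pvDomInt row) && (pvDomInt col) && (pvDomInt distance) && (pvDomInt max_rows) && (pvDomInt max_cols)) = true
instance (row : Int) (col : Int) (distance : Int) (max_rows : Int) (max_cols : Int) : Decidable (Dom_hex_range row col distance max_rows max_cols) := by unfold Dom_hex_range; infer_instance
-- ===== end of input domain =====

-- B replaces A's synchronous ring expansion (frontier/next_ring sets iterated `distance` times)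
-- by a single queue-based BFS with per-node distance labels that stops when the queue empties
-- (objective: alternative decomposition of the same search).

-- ===== PORT A =====
-- shared module helpers (hex_neighbors / hex_neighbors_bounded, used by both Pythons)
def hexNeighbors (row col : Int) : List (Int × Int) :=
  let deltas : List (Int × Int) :=
    if PySem.Int.mod row 2 == 0 then [(-1, 0), (-1, 1), (0, -1), (0, 1), (1, 0), (1, 1)]
    else [(-1, -1), (-1, 0), (0, -1), (0, 1), (1, -1), (1, 0)]
  deltas.map (fun d => (row + d.1, col + d.2))

def inGrid (max_rows max_cols : Int) (p : Int × Int) : Bool :=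
  decide (1 ≤ p.1) && decide (p.1 ≤ max_rows) && decide (1 ≤ p.2) && decide (p.2 ≤ max_cols)

def hexNeighborsBounded (row col max_rows max_cols : Int) : List (Int × Int) :=
  (hexNeighbors row col).filter (inGrid max_rows max_cols)

-- one frontier cell processed: state = (next_ring, visited)
def hexStep (max_rows max_cols : Int) (st : PySem.Set (Int × Int) × PySem.Set (Int × Int))
    (p : Int × Int) : PySem.Set (Int × Int) × PySem.Set (Int × Int) :=
  (hexNeighborsBounded p.1 p.2 max_rows max_cols).foldl
    (fun st n => if PySem.Set.contains st.2 n then st else (PySem.Set.add st.1 n, PySem.Set.add st.2 n)) st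

-- `for _ in range(distance)` of A, state = (visited, frontier)
def aLoop (max_rows max_cols : Int) : Nat → PySem.Set (Int × Int) → PySem.Set (Int × Int) → PySem.Set (Int × Int)
  | 0, visited, _ => visited
  | n + 1, visited, frontier =>
      let st := frontier.foldl (hexStep max_rows max_cols) (PySem.Set.empty, visited)
      aLoop max_rows max_cols n st.2 st.1

def hex_range (row : Int) (col : Int) (distance : Int) (max_rows : Int) (max_cols : Int) : List (Int × Int) :=
  if distance ≤ 0 then []
  else
    let visited := aLoop max_rows max_cols distance.toNat [(row, col)] [(row, col)]
    PySem.List.sorted2 (PySem.Set.discard visited (row, col)) Prod.fst Prod.snd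

-- ===== PORT B =====
-- single FIFO BFS loop; fuel only makes the recursion structural (each pop costs 1; the
-- number of pops is bounded by 1 + grid size, proved below — the `0` fuel branch is never reached)
def bfsLoop (max_rows max_cols dist : Int) : Nat → List (Int × Int × Int) → PySem.Set (Int × Int) → PySem.Set (Int × Int)
  | _, [], visited => visited
  | 0, _ :: _, visited => visited
  | fuel + 1, (r, c, d) :: rest, visited =>
      if d < dist then
        let st := (hexNeighborsBounded r c max_rows max_cols).foldl
          (fun st n => if PySem.Set.contains st.1 n then st
                       else (PySem.Set.add st.1 n, st.2 ++ [(n.1, n.2, d + 1)])) (visited, rest)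
        bfsLoop max_rows max_cols dist fuel st.2 st.1
      else bfsLoop max_rows max_cols dist fuel rest visited

def hex_range_alt (row : Int) (col : Int) (distance : Int) (max_rows : Int) (max_cols : Int) : List (Int × Int) :=
  let visited := bfsLoop max_rows max_cols distance (max_rows.toNat * max_cols.toNat + 1)
    [(row, col, 0)] [(row, col)]
  PySem.List.sorted2 (PySem.Set.discard visited (row, col)) Prod.fst Prod.snd

-- ===== PRECONDITION & SPEC =====
def Spec_hex_range (row : Int) (col : Int) (distance : Int) (max_rows : Int) (max_cols : Int) (out : List (Int × Int)) : Prop := out = hex_range_alt row col distance max_rows max_cols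
instance (row : Int) (col : Int) (distance : Int) (max_rows : Int) (max_cols : Int) (out : List (Int × Int)) : Decidable (Spec_hex_range row col distance max_rows max_cols out) := by unfold Spec_hex_range; infer_instance

-- ===== CLAIM (what is proved, stated in full; the proofs are below) =====
def Claim_equal_hex_range : Prop := ∀ (row : Int) (col : Int) (distance : Int) (max_rows : Int) (max_cols : Int), Dom_hex_range row col distance max_rows max_cols → Spec_hex_range row col distance max_rows max_cols (hex_range row col distance max_rows max_cols)

-- ===== LEMMAS AND PROOFS =====

-- A-side inner fold (one frontier cell) and B-side inner fold (one queue expansion) discover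
-- the SAME new cells Δ, in the same order; both append Δ to visited.
theorem inner_align (d : Int) (L : List (Int × Int)) :
    ∀ (ring vis : List (Int × Int)) (q : List (Int × Int × Int)),
    (∀ x ∈ ring, x ∈ vis) →
    ∃ Δ : List (Int × Int),
      L.foldl (fun st n => if PySem.Set.contains st.2 n then st
                           else (PySem.Set.add st.1 n, PySem.Set.add st.2 n)) (ring, vis)
        = (ring ++ Δ, vis ++ Δ)
      ∧ L.foldl (fun st n => if PySem.Set.contains st.1 n then st
                             else (PySem.Set.add st.1 n, st.2 ++ [(n.1, n.2, d)])) (vis, q)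
        = (vis ++ Δ, q ++ Δ.map (fun n => (n.1, n.2, d)))
      ∧ (∀ x ∈ Δ, x ∈ L)
      ∧ (vis.Nodup → (vis ++ Δ).Nodup) := by
  induction L with
  | nil =>
    intro ring vis q _
    exact ⟨[], by simp, by simp, by simp, fun h => by simpa using h⟩
  | cons n L ih =>
    intro ring vis q hring
    by_cases h : n ∈ vis
    · obtain ⟨Δ, hA, hB, hmem, hnd⟩ := ih ring vis q hring
      refine ⟨Δ, ?_, ?_, ?_, hnd⟩
      · simpa [List.foldl_cons, h] using hA
      · simpa [List.foldl_cons, h] using hB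
      · exact fun x hx => List.mem_cons_of_mem _ (hmem x hx)
    · have hnr : n ∉ ring := fun hx => h (hring n hx)
      have hring' : ∀ x ∈ ring ++ [n], x ∈ vis ++ [n] := by
        intro x hx
        rcases List.mem_append.mp hx with hx | hx
        · exact List.mem_append.mpr (Or.inl (hring x hx))
        · exact List.mem_append.mpr (Or.inr hx)
      obtain ⟨Δ, hA, hB, hmem, hnd⟩ := ih (ring ++ [n]) (vis ++ [n]) (q ++ [(n.1, n.2, d)]) hring'
      refine ⟨n :: Δ, ?_, ?_, ?_, ?_⟩
      · simpa [List.foldl_cons, h, PySem.Set.add_of_not_mem hnr, PySem.Set.add_of_not_mem h,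
          List.append_assoc] using hA
      · simpa [List.foldl_cons, h, PySem.Set.add_of_not_mem h, List.append_assoc] using hB
      · intro x hx
        rcases List.mem_cons.mp hx with rfl | hx
        · exact List.mem_cons_self ..
        · exact List.mem_cons_of_mem _ (hmem x hx)
      · intro hv
        have hvn : (vis ++ [n]).Nodup := by
          rw [List.nodup_append]
          refine ⟨hv, by simp, ?_⟩
          intro a ha b hb heq
          rw [List.mem_singleton.mp hb] at heq
          exact h (heq ▸ ha)
        simpa [List.append_assoc] using hnd hvn

-- a Nodup list of cells inside the grid has at most max_rows * max_cols elements
theorem length_filter_inGrid_le (mr mc : Int) (l : List (Int × Int)) (h : l.Nodup) :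
    (l.filter (inGrid mr mc)).length ≤ mr.toNat * mc.toNat := by
  have hnd : (l.filter (inGrid mr mc)).Nodup := h.filter _
  have hsub : (l.filter (inGrid mr mc)).toFinset ⊆
      Finset.Icc (1 : Int) mr ×ˢ Finset.Icc (1 : Int) mc := by
    intro p hp
    have hp' := List.mem_toFinset.mp hp
    have hg : inGrid mr mc p = true := List.of_mem_filter hp'
    simp only [inGrid, Bool.and_eq_true, decide_eq_true_eq] at hg
    simp only [Finset.mem_product, Finset.mem_Icc]
    omega
  calc (l.filter (inGrid mr mc)).length
      = (l.filter (inGrid mr mc)).toFinset.card := (List.toFinset_card_of_nodup hnd).symm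
    _ ≤ (Finset.Icc (1 : Int) mr ×ˢ Finset.Icc (1 : Int) mc).card := Finset.card_le_card hsub
    _ = (Finset.Icc (1 : Int) mr).card * (Finset.Icc (1 : Int) mc).card := Finset.card_product ..
    _ = mr.toNat * mc.toNat := by rw [Int.card_Icc, Int.card_Icc]; norm_num

-- once labels have reached `dist`, B only drains its queue
theorem bfs_drain (mr mc dist k : Int) (hk : ¬ k < dist) :
    ∀ (R : List (Int × Int)) (vis : PySem.Set (Int × Int)) (fuel : Nat), R.length ≤ fuel →
    bfsLoop mr mc dist fuel (R.map (fun c => (c.1, c.2, k))) vis = vis := by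
  intro R
  induction R with
  | nil => intro vis fuel _; cases fuel <;> rfl
  | cons p R ih =>
    intro vis fuel hf
    obtain ⟨f, rfl⟩ : ∃ f, fuel = f + 1 := ⟨fuel - 1, by simp at hf; omega⟩
    simp only [List.map_cons, bfsLoop, hk, if_false]
    exact ih vis f (by simp at hf ⊢; omega)

-- MAIN ALIGNMENT: mid-level state of B's queue (suffix F2 of the current frontier at label k,
-- partial next ring R at label k+1) versus A's remaining synchronous computation (m levels left)
theorem main_align (mr mc dist : Int) :
    ∀ (m : Nat) (k : Int) (F2 R vis : List (Int × Int)) (fuel : Nat),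
    k < dist → m = (dist - (k + 1)).toNat →
    (∀ x ∈ R, x ∈ vis) → vis.Nodup →
    F2.length + R.length + (mr.toNat * mc.toNat - (vis.filter (inGrid mr mc)).length) ≤ fuel →
    bfsLoop mr mc dist fuel
        (F2.map (fun c => (c.1, c.2, k)) ++ R.map (fun c => (c.1, c.2, k + 1))) vis
      = aLoop mr mc m (F2.foldl (hexStep mr mc) (R, vis)).2 (F2.foldl (hexStep mr mc) (R, vis)).1 := by
  intro m
  induction m using Nat.strong_induction_on with
  | _ m ihm =>
    intro k F2
    induction F2 with
    | nil =>
      intro R vis fuel hk hm hRv hnd hfuel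
      simp only [List.foldl_nil, List.map_nil, List.nil_append]
      cases m with
      | zero =>
        have hk1 : ¬ (k + 1 < dist) := by omega
        exact bfs_drain mr mc dist (k + 1) hk1 R vis fuel (by simp at hfuel; omega)
      | succ m' =>
        have hk1 : k + 1 < dist := by omega
        have hrec := ihm m' (by omega) (k + 1) R [] vis fuel hk1 (by omega)
          (by simp) hnd (by simp at hfuel ⊢; omega)
        simp only [List.map_nil, List.append_nil] at hrec
        rw [hrec]
        rfl
    | cons p F2' ihf =>
      intro R vis fuel hk hm hRv hnd hfuel
      obtain ⟨f, rfl⟩ : ∃ f, fuel = f + 1 :=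
        ⟨fuel - 1, by simp only [List.length_cons] at hfuel; omega⟩
      obtain ⟨Δ, hA, hB, hmem, hndΔ⟩ :=
        inner_align (k + 1) (hexNeighborsBounded p.1 p.2 mr mc) R vis
          (F2'.map (fun c => (c.1, c.2, k)) ++ R.map (fun c => (c.1, c.2, k + 1))) hRv
      have hΔgrid : ∀ x ∈ Δ, inGrid mr mc x = true := by
        intro x hx
        exact List.of_mem_filter (hmem x hx)
      have hcard : ((vis ++ Δ).filter (inGrid mr mc)).length
          = (vis.filter (inGrid mr mc)).length + Δ.length := by
        rw [List.filter_append, List.length_append, List.filter_eq_self.mpr hΔgrid]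
      have hcardle : ((vis ++ Δ).filter (inGrid mr mc)).length ≤ mr.toNat * mc.toNat :=
        length_filter_inGrid_le mr mc (vis ++ Δ) (hndΔ hnd)
      have hstepA : (p :: F2').foldl (hexStep mr mc) (R, vis)
          = F2'.foldl (hexStep mr mc) (R ++ Δ, vis ++ Δ) := by
        simp only [List.foldl_cons]
        have : hexStep mr mc (R, vis) p = (R ++ Δ, vis ++ Δ) := by
          simpa [hexStep] using hA
        rw [this]
      have hrec := ihf (R ++ Δ) (vis ++ Δ) f hk hm
        (by intro x hx; rw [List.mem_append] at hx ⊢; exact hx.imp (hRv x) id)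
        (hndΔ hnd)
        (by simp only [List.length_append, List.length_cons] at hfuel ⊢; omega)
      rw [hstepA, ← hrec]
      simp only [List.map_cons, List.cons_append, bfsLoop, hk, if_true]
      congr 1
      · simpa [List.map_append, List.append_assoc] using congrArg Prod.snd hB
      · simpa using congrArg Prod.fst hB

theorem hex_range_spec : Claim_equal_hex_range := by
  intro row col distance max_rows max_cols _
  unfold Spec_hex_range hex_range hex_range_alt
  by_cases hd : distance ≤ 0
  · have h0 : ¬ ((0 : Int) < distance) := by omega
    simp only [hd, if_true, bfsLoop, h0, if_false]
    have hdisc : PySem.Set.discard [(row, col)] (row, col) = [] := by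
      simp [PySem.Set.discard]
    rw [hdisc]
    rfl
  · have h0 : (0 : Int) < distance := by omega
    have hm : distance.toNat = (distance - 1).toNat + 1 := by omega
    have halign := main_align max_rows max_cols distance (distance - 1).toNat 0
      [(row, col)] [] [(row, col)] (max_rows.toNat * max_cols.toNat + 1)
      h0 (by omega) (by simp) (by simp)
      (by simp only [List.length_cons, List.length_nil]; omega)
    have hvis : aLoop max_rows max_cols distance.toNat [(row, col)] [(row, col)]
        = bfsLoop max_rows max_cols distance (max_rows.toNat * max_cols.toNat + 1)
            [(row, col, 0)] [(row, col)] := by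
      rw [hm]
      show aLoop max_rows max_cols ((distance - 1).toNat)
        ([(row, col)].foldl (hexStep max_rows max_cols) (PySem.Set.empty, [(row, col)])).2
        ([(row, col)].foldl (hexStep max_rows max_cols) (PySem.Set.empty, [(row, col)])).1 = _
      rw [show (PySem.Set.empty : PySem.Set (Int × Int)) = [] from rfl, ← halign]
      simp
    simp only [hd, if_false]
    rw [hvis]
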